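-- pv_equiv track=rewrite | github.com/c4s4/pendu | pendu.py | filter_dictionnary
-- ===== SOURCE A (Python) =====
-- def list_words(dictionnary, letter, position):
--     '''Renvoie la liste des mots pour lesquels la lettre donnée est à la bonne
--     position.'''
--     words = []
--     for word in dictionnary:
--         if word[position] == letter:
--             words.append(word)
--     return words
--
-- def filter_dictionnary(dictionnary, discovered, letters):
--     size = len(discovered)
--     filtered = [word for word in dictionnary if len(word) == size]
--     position = 0
--     for letter in discovered:
--         if letter:
--             filtered = list_words(filtered, letter, position)
--         position += 1
--     # enlever les mots qui contiennent des lettres qui ont été proposées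
--     # mais qui ne sont pas dans les lettres découvertes
--     bad_letters = letters - set([l for l in discovered if l])
--     return [word for word in filtered
--             if not bad_letters.intersection(set(word))]
-- ===== SOURCE B (Python) =====
-- def filter_dictionnary(dictionnary, discovered, letters):
--     size = len(discovered)
--     good = {l for l in discovered if l}
--     bad = set(letters) - good
--     return [word for word in dictionnary
--             if len(word) == size
--             and all(word[i] == l for i, l in enumerate(discovered) if l)
--             and bad.isdisjoint(word)]
-- ===== Notes on version B (the rewrite author's own statement) =====
-- stated objective: simpler
-- what changed: B computes the bad-letter set once and returns a single comprehension over the words, testing length, positional match against discovered and disjointness from the bad letters in one combined per-word test, eliminating the list_words helper, the per-letter rebuilds of the word list and the per-word set(word) construction.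
import Mathlib
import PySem

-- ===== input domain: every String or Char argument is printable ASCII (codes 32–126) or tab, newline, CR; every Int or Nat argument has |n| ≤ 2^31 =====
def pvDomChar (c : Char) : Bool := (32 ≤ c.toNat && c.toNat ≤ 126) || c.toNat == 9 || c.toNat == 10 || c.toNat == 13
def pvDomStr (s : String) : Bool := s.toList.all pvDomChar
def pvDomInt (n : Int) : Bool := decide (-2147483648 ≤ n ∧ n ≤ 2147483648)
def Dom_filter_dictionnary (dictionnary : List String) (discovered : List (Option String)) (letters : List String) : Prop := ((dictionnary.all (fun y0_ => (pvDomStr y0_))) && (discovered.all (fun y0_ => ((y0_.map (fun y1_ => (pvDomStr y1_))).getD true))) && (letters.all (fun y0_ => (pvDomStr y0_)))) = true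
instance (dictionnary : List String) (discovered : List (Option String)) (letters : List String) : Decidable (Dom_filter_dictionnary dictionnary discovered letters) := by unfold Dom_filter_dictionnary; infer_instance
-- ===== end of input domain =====

-- B merges A's per-letter re-scans of the word list into one pass over the words
-- with a single combined keep-test (objective: simpler; same result proved equal).

-- word[position] in Python yields a 1-character string; this builds it
def pvCharStr (c : Char) : String := String.ofList [c]

-- ===== PORT A =====
-- word[position]: at every call site inside filter_dictionnary the index is in
-- range (all words in 'dictionnary' passed here have len = size > position), so
-- the 'none' branch (Python IndexError) is unreachable there.
def list_words (dictionnary : List String) (letter : String) (position : Int) : List String :=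
  dictionnary.foldl
    (fun words word =>
      if ((PySem.Str.pyGet? word position).map pvCharStr == some letter) then words ++ [word]
      else words) []

def filter_dictionnary (dictionnary : List String) (discovered : List (Option String)) (letters : List String) : List String :=
  let size := PySem.List.len discovered
  let filtered := dictionnary.filter (fun word => PySem.Str.len word == size)
  -- 'for letter in discovered: if letter: filtered = list_words(...); position += 1'
  let st := discovered.foldl
    (fun (st : List String × Int) letter =>
      (if letter.getD "" ≠ "" then list_words st.1 (letter.getD "") st.2 else st.1, st.2 + 1))
    (filtered, 0)
  let good : PySem.Set String :=
    PySem.Set.ofList (discovered.filterMap (fun l => if l.getD "" ≠ "" then some (l.getD "") else none))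
  let bad : PySem.Set String := PySem.Set.diff (PySem.Set.ofList letters) good
  st.1.filter (fun word =>
    (PySem.Set.inter bad (PySem.Set.ofList (word.toList.map pvCharStr))).isEmpty)

-- ===== PORT B =====
def filter_dictionnary_alt (dictionnary : List String) (discovered : List (Option String)) (letters : List String) : List String :=
  let size := PySem.List.len discovered
  let good : PySem.Set String :=
    PySem.Set.ofList (discovered.filterMap (fun l => if l.getD "" ≠ "" then some (l.getD "") else none))
  let bad : PySem.Set String := PySem.Set.diff (PySem.Set.ofList letters) good
  dictionnary.filter (fun word =>
    (PySem.Str.len word == size)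
    && (PySem.List.enumerate discovered 0).all (fun p =>
         if p.2.getD "" ≠ "" then ((PySem.Str.pyGet? word p.1).map pvCharStr == some (p.2.getD "")) else true)
    && PySem.Set.isdisjoint bad (word.toList.map pvCharStr))

-- ===== PRECONDITION & SPEC =====
def Spec_filter_dictionnary (dictionnary : List String) (discovered : List (Option String)) (letters : List String) (out : List String) : Prop := out = filter_dictionnary_alt dictionnary discovered letters
instance (dictionnary : List String) (discovered : List (Option String)) (letters : List String) (out : List String) : Decidable (Spec_filter_dictionnary dictionnary discovered letters out) := by unfold Spec_filter_dictionnary; infer_instance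

-- ===== CLAIM (what is proved, stated in full; the proofs are below) =====
def Claim_equal_filter_dictionnary : Prop := ∀ (dictionnary : List String) (discovered : List (Option String)) (letters : List String), Dom_filter_dictionnary dictionnary discovered letters → Spec_filter_dictionnary dictionnary discovered letters (filter_dictionnary dictionnary discovered letters)

-- ===== LEMMAS AND PROOFS =====

theorem pv_isEmpty_filter {α : Type} (p : α → Bool) (l : List α) :
    (l.filter p).isEmpty = !l.any p := by
  induction l with
  | nil => rfl
  | cons x xs ih =>
    by_cases h : p x = true <;> simp [List.any_cons, h, ih]

theorem pv_contains_ofList {α : Type} [BEq α] [LawfulBEq α] (ws : List α) (x : α) :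
    (PySem.Set.ofList ws).contains x = ws.contains x := by
  rw [Bool.eq_iff_iff]
  simp [PySem.Set.contains, PySem.Set.mem_ofList]

theorem pv_inter_isEmpty {α : Type} [BEq α] [LawfulBEq α] (s ws : List α) :
    (PySem.Set.inter s (PySem.Set.ofList ws)).isEmpty = PySem.Set.isdisjoint s ws := by
  show (s.filter _).isEmpty = _
  rw [pv_isEmpty_filter]
  unfold PySem.Set.isdisjoint
  congr 1
  have hf : (fun x => (PySem.Set.ofList ws).contains x) = fun x => PySem.Set.contains ws x :=
    funext fun x => pv_contains_ofList ws x
  rw [hf]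

theorem pv_list_words_eq (l : List String) (letter : String) (pos : Int) :
    list_words l letter pos
      = l.filter (fun w => (PySem.Str.pyGet? w pos).map pvCharStr == some letter) := by
  unfold list_words
  have := PySem.List.foldl_append_if
    (fun w => (PySem.Str.pyGet? w pos).map pvCharStr == some letter) (id : String → String) l []
  simpa using this

theorem pv_loop_eq (discovered : List (Option String)) (l : List String) (pos : Int) :
    (discovered.foldl
      (fun (st : List String × Int) letter =>
        (if letter.getD "" ≠ "" then list_words st.1 (letter.getD "") st.2 else st.1, st.2 + 1))
      (l, pos)).1
    = l.filter (fun w => (PySem.List.enumerate discovered pos).all (fun p =>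
        if p.2.getD "" ≠ "" then ((PySem.Str.pyGet? w p.1).map pvCharStr == some (p.2.getD "")) else true)) := by
  induction discovered generalizing l pos with
  | nil => simp [PySem.List.enumerate_nil]
  | cons letter rest ih =>
    simp only [List.foldl_cons, PySem.List.enumerate_cons, List.all_cons]
    by_cases h : letter.getD "" ≠ ""
    · rw [if_pos h, ih, pv_list_words_eq, List.filter_filter]
      refine List.filter_congr fun w _ => ?_
      rw [if_pos h]
      exact Bool.and_comm _ _
    · rw [if_neg h, ih]
      refine List.filter_congr fun w _ => ?_
      rw [if_neg h, Bool.true_and]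

-- ===== VERDICT (by name: the statement is the Claim_ definition above) =====
theorem filter_dictionnary_spec : Claim_equal_filter_dictionnary := by
  intro dictionnary discovered letters _
  show filter_dictionnary dictionnary discovered letters = filter_dictionnary_alt dictionnary discovered letters
  unfold filter_dictionnary filter_dictionnary_alt
  dsimp only
  rw [pv_loop_eq, List.filter_filter, List.filter_filter]
  apply List.filter_congr
  intro w _
  rw [pv_inter_isEmpty]
  simp [Bool.and_comm, Bool.and_left_comm]
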